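-- pv_equiv track=rewrite | github.com/shtaneja28/ProcessFlowBuilder | build_flowchart_smart.py | plan_decision_routes
-- ===== SOURCE A (Python) =====
-- from collections import defaultdict, deque
-- from collections import deque, defaultdict
--
-- def plan_decision_routes(nodes, edges):
--     out_by_src = defaultdict(list)
--     for u, v, lbl in edges:
--         out_by_src[u].append((v, lbl))
--
--     route_pref = {}
--     for nid, ndata in nodes.items():
--         if ndata["kind"] != "decision":
--             continue
--         outs = out_by_src.get(nid, [])
--         if not outs:
--             continue
--         outs = sorted(outs, key=lambda t: (t[1] != "Yes", t[1]))
--         if len(outs) == 1: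
--             route_pref[(nid, outs[0][0])] = "down"
--         else:
--             route_pref[(nid, outs[0][0])] = "right"
--             route_pref[(nid, outs[1][0])] = "down"
--     return route_pref
-- ===== SOURCE B (Python) =====
-- from collections import defaultdict
--
--
-- def plan_decision_routes(nodes, edges):
--     out_by_src = defaultdict(list)
--     for u, v, lbl in edges:
--         out_by_src[u].append((v, lbl))
--
--     def lt(t, u):
--         a, b = t[1] != "Yes", u[1] != "Yes"
--         return a < b or (a == b and t[1] < u[1])
--
--     route_pref = {}
--     for nid, ndata in nodes.items():
--         if ndata.get("kind") != "decision":
--             continue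
--         best = second = None
--         for t in out_by_src.get(nid, []):
--             if best is None:
--                 best = t
--             elif lt(t, best):
--                 best, second = t, best
--             elif second is None or lt(t, second):
--                 second = t
--         if best is None:
--             continue
--         if second is None:
--             route_pref[(nid, best[0])] = "down"
--         else:
--             route_pref[(nid, best[0])] = "right"
--             route_pref[(nid, second[0])] = "down"
--     return route_pref
-- ===== Notes on version B (the rewrite author's own statement) =====
-- stated objective: alternative
-- what changed: B replaces A's full stable sort of each decision node's out-edges by a single linear best/second-best selection scan (strict lexicographic less, earliest edge wins ties), then applies the same right/down assignment.
import Mathlib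
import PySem

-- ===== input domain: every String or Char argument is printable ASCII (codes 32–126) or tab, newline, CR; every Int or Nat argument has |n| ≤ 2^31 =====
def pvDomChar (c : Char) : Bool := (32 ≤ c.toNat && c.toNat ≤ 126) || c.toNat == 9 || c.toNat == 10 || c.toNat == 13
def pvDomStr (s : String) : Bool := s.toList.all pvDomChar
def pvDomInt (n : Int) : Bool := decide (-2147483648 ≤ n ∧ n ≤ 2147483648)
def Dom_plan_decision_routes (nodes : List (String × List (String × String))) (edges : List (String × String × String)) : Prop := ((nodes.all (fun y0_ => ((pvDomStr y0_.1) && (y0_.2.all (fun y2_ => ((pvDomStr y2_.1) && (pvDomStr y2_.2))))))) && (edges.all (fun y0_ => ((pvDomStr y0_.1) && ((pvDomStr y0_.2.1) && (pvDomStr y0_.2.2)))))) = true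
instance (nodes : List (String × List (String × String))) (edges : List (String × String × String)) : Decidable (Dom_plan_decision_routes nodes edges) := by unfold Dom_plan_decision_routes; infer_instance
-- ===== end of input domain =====

-- B replaces A's full stable sort of each decision node's out-edges by a single
-- top-two selection scan (alternative algorithm); same routing assignments.


-- ===== PORT A =====
def plan_decision_routes (nodes : List (String × List (String × String))) (edges : List (String × String × String)) : List (String × String × String) :=
  -- out_by_src = defaultdict(list); for u, v, lbl in edges: out_by_src[u].append((v, lbl))
  let out_by_src : PySem.Dict String (List (String × String)) :=
    edges.foldl (fun d e => d.modify e.1 [] (· ++ [e.2])) PySem.Dict.empty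
  let route_pref : PySem.Dict (String × String) String :=
    nodes.foldl (fun rp p =>
      match PySem.Dict.get? (PySem.Dict.mk p.2) "kind" with
      | none => rp   -- Python raises KeyError here; such inputs are outside Pre_
      | some kind =>
        if kind ≠ "decision" then rp
        else
          let outs := out_by_src.getD p.1 []
          if outs = [] then rp
          else
            let souts := PySem.List.sorted2 outs (fun t => decide (t.2 ≠ "Yes")) (fun t => t.2)
            match souts with
            | [] => rp
            | [t0] => rp.insert (p.1, t0.1) "down"
            | t0 :: t1 :: _ => (rp.insert (p.1, t0.1) "right").insert (p.1, t1.1) "down")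
      PySem.Dict.empty
  route_pref.items.map (fun q => (q.1.1, q.1.2, q.2))

-- ===== PORT B =====
-- strict lexicographic "less" under the key (lbl != "Yes", lbl)
def pdrLt (t u : String × String) : Bool :=
  let a := decide (t.2 ≠ "Yes")
  let b := decide (u.2 ≠ "Yes")
  decide (a < b) || (a == b && decide (t.2 < u.2))

-- one step of the best/second selection loop
def pdrStep (st : Option ((String × String) × Option (String × String))) (t : String × String) :
    Option ((String × String) × Option (String × String)) :=
  match st with
  | none => some (t, none)
  | some (b, s) =>
    if pdrLt t b then some (t, some b)
    else
      match s with
      | none => some (b, some t)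
      | some sc => if pdrLt t sc then some (b, some t) else some (b, some sc)

-- linear scan keeping the best and second-best out-edge (earliest wins on ties)
def pdrTop2 (l : List (String × String)) : Option ((String × String) × Option (String × String)) :=
  l.foldl pdrStep none

def plan_decision_routes_alt (nodes : List (String × List (String × String))) (edges : List (String × String × String)) : List (String × String × String) :=
  let out_by_src : PySem.Dict String (List (String × String)) :=
    edges.foldl (fun d e => d.modify e.1 [] (· ++ [e.2])) PySem.Dict.empty
  let route_pref : PySem.Dict (String × String) String :=
    nodes.foldl (fun rp p =>
      if PySem.Dict.get? (PySem.Dict.mk p.2) "kind" ≠ some "decision" then rp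
      else
        match pdrTop2 (out_by_src.getD p.1 []) with
        | none => rp
        | some (b, none) => rp.insert (p.1, b.1) "down"
        | some (b, some s) => (rp.insert (p.1, b.1) "right").insert (p.1, s.1) "down")
      PySem.Dict.empty
  route_pref.items.map (fun q => (q.1.1, q.1.2, q.2))

-- ===== PRECONDITION & SPEC =====
-- Pre_ excludes exactly the inputs where A raises KeyError: a node whose data dict has no "kind" key.
def Pre_plan_decision_routes (nodes : List (String × List (String × String))) (_edges : List (String × String × String)) : Prop :=
  ∀ p ∈ nodes, (PySem.Dict.mk p.2).contains "kind" = true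
instance (nodes : List (String × List (String × String))) (edges : List (String × String × String)) : Decidable (Pre_plan_decision_routes nodes edges) := by unfold Pre_plan_decision_routes; infer_instance
def pvWitness_plan_decision_routes : (List (String × List (String × String))) × (List (String × String × String)) :=
  ([("d", [("kind", "decision")]), ("t", [("kind", "task")])],
   [("d", "x", "No"), ("d", "y", "Yes"), ("t", "z", "")])

def Spec_plan_decision_routes (nodes : List (String × List (String × String))) (edges : List (String × String × String)) (out : List (String × String × String)) : Prop := out = plan_decision_routes_alt nodes edges
instance (nodes : List (String × List (String × String))) (edges : List (String × String × String)) (out : List (String × String × String)) : Decidable (Spec_plan_decision_routes nodes edges out) := by unfold Spec_plan_decision_routes; infer_instance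

-- ===== CLAIM (what is proved, stated in full; the proofs are below) =====
def Claim_equal_plan_decision_routes : Prop := ∀ (nodes : List (String × List (String × String))) (edges : List (String × String × String)), Dom_plan_decision_routes nodes edges → Pre_plan_decision_routes nodes edges → Spec_plan_decision_routes nodes edges (plan_decision_routes nodes edges)

-- ===== LEMMAS AND PROOFS =====

-- the first two elements of a list, in B's state shape
def pdrFirstTwo (l : List (String × String)) : Option ((String × String) × Option (String × String)) :=
  match l with
  | [] => none
  | a :: rest => some (a, rest.head?)

theorem pdrLt_eq_before (t u : String × String) :
    (decide (decide (t.2 ≠ "Yes") < decide (u.2 ≠ "Yes"))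
      || !decide (decide (u.2 ≠ "Yes") < decide (t.2 ≠ "Yes")) && decide (t.2 < u.2)) = pdrLt t u := by
  by_cases h1 : t.2 = "Yes" <;> by_cases h2 : u.2 = "Yes" <;>
    simp [pdrLt, h1, h2]

-- sorted2 with A's key is the insertion-sort loop over B's comparison
theorem sorted2_eq_insertBy_pdrLt (l : List (String × String)) :
    PySem.List.sorted2 l (fun t => decide (t.2 ≠ "Yes")) (fun t => t.2) =
      l.foldl (fun acc x => PySem.List.insertBy pdrLt x acc) [] := by
  unfold PySem.List.sorted2
  apply PySem.List.foldl_congr_mem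
  intro acc x _
  congr 1
  funext a b
  exact pdrLt_eq_before a b

theorem pdrFirstTwo_insertBy (x : String × String) (acc : List (String × String)) :
    pdrFirstTwo (PySem.List.insertBy pdrLt x acc) = pdrStep (pdrFirstTwo acc) x := by
  match acc with
  | [] => simp [PySem.List.insertBy, pdrFirstTwo, pdrStep]
  | a :: rest =>
    by_cases h : pdrLt x a = true
    · simp [PySem.List.insertBy, h, pdrFirstTwo, pdrStep]
    · match rest with
      | [] => simp [PySem.List.insertBy, h, pdrFirstTwo, pdrStep]
      | b :: rest' =>
        by_cases h2 : pdrLt x b = true <;>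
          simp [PySem.List.insertBy, h, h2, pdrFirstTwo, pdrStep]

theorem pdrFirstTwo_foldl (l : List (String × String)) (acc : List (String × String)) :
    pdrFirstTwo (l.foldl (fun a x => PySem.List.insertBy pdrLt x a) acc) =
      l.foldl pdrStep (pdrFirstTwo acc) := by
  induction l generalizing acc with
  | nil => rfl
  | cons y ys ih =>
    simp only [List.foldl_cons, ih, pdrFirstTwo_insertBy]

-- B's top-two scan returns the first two elements of A's sorted list
theorem pdrTop2_eq_firstTwo_sorted (l : List (String × String)) :
    pdrTop2 l = pdrFirstTwo (PySem.List.sorted2 l (fun t => decide (t.2 ≠ "Yes")) (fun t => t.2)) := by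
  rw [sorted2_eq_insertBy_pdrLt, pdrFirstTwo_foldl]
  rfl

theorem node_step_eq (out_by_src : PySem.Dict String (List (String × String)))
    (rp : PySem.Dict (String × String) String) (p : String × List (String × String))
    (hk : (PySem.Dict.mk p.2).contains "kind" = true) :
    (match PySem.Dict.get? (PySem.Dict.mk p.2) "kind" with
      | none => rp
      | some kind =>
        if kind ≠ "decision" then rp
        else
          let outs := out_by_src.getD p.1 []
          if outs = [] then rp
          else
            let souts := PySem.List.sorted2 outs (fun t => decide (t.2 ≠ "Yes")) (fun t => t.2)
            match souts with
            | [] => rp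
            | [t0] => rp.insert (p.1, t0.1) "down"
            | t0 :: t1 :: _ => (rp.insert (p.1, t0.1) "right").insert (p.1, t1.1) "down") =
    (if PySem.Dict.get? (PySem.Dict.mk p.2) "kind" ≠ some "decision" then rp
     else
       match pdrTop2 (out_by_src.getD p.1 []) with
       | none => rp
       | some (b, none) => rp.insert (p.1, b.1) "down"
       | some (b, some s) => (rp.insert (p.1, b.1) "right").insert (p.1, s.1) "down") := by
  rw [PySem.Dict.contains_eq_isSome_get?] at hk
  cases hg : PySem.Dict.get? (PySem.Dict.mk p.2) "kind" with
  | none => rw [hg] at hk; simp at hk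
  | some kind =>
    by_cases hd : kind = "decision"
    · subst hd
      simp only [ne_eq, not_true_eq_false, if_false]
      rw [pdrTop2_eq_firstTwo_sorted]
      set outs := out_by_src.getD p.1 [] with houts
      by_cases ho : outs = []
      · simp only [ho]
        rfl
      · have hperm := PySem.List.sorted2_perm outs (fun t => decide (t.2 ≠ "Yes")) (fun t => t.2) false
        simp only [if_neg ho]
        cases hs : PySem.List.sorted2 outs (fun t => decide (t.2 ≠ "Yes")) (fun t => t.2) with
        | nil =>
          exact absurd (List.Perm.nil_eq (hs ▸ hperm)).symm ho
        | cons t0 rest =>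
          cases rest with
          | nil => simp [pdrFirstTwo]
          | cons t1 rest' => simp [pdrFirstTwo]
    · simp only [ne_eq, hd, not_false_eq_true, if_true, Option.some.injEq]

theorem plan_decision_routes_spec : Claim_equal_plan_decision_routes := by
  intro nodes edges _ hpre
  unfold Spec_plan_decision_routes plan_decision_routes plan_decision_routes_alt
  refine congrArg (List.map _) (congrArg PySem.Dict.items ?_)
  refine PySem.List.foldl_congr_mem _ _ _ _ ?_
  intro rp p hp
  exact node_step_eq _ rp p (hpre p hp)
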